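-- pv_equiv track=rewrite | github.com/theodoroferreira/sistema-especialista | specialist.py | get_harmonic_field
-- ===== SOURCE A (Python) =====
-- NOTES = ['C', 'C#', 'D', 'D#', 'E', 'F', 'F#', 'G', 'G#', 'A', 'A#', 'B']
--
-- MAJOR_SCALE_INTERVALS = [0, 2, 4, 5, 7, 9, 11]
--
-- NATURAL_MINOR_SCALE_INTERVALS = [0, 2, 3, 5, 7, 8, 10]
--
-- MAJOR_KEY_CHORDS = ['', 'm', 'm', '', '', 'm', 'dim']
--
-- MINOR_KEY_CHORDS = ['m', 'dim', '', 'm', 'm', '', '']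
--
-- def get_harmonic_field(root_note: str) -> list[str]:
--     is_minor = 'm' in root_note
--     root_note_name = root_note.replace('m', '')
--
--     try:
--         root_index = NOTES.index(root_note_name.upper())
--     except ValueError:
--         return None
--
--     scale_intervals = NATURAL_MINOR_SCALE_INTERVALS if is_minor else MAJOR_SCALE_INTERVALS
--     chord_qualities = MINOR_KEY_CHORDS if is_minor else MAJOR_KEY_CHORDS
--
--     harmonic_field = []
--     for i in range(7):
--         note_index = (root_index + scale_intervals[i]) % 12
--         note_name = NOTES[note_index]
--
--         chord_name = f"{note_name}{chord_qualities[i]}"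
--         harmonic_field.append(chord_name)
--
--     return harmonic_field
-- ===== SOURCE B (Python) =====
-- NOTES = ['C', 'C#', 'D', 'D#', 'E', 'F', 'F#', 'G', 'G#', 'A', 'A#', 'B']
--
-- MAJOR_SCALE_STEPS = [2, 2, 1, 2, 2, 2, 1]
--
-- MINOR_SCALE_STEPS = [2, 1, 2, 2, 1, 2, 2]
--
-- MAJOR_KEY_CHORDS = ['', 'm', 'm', '', '', 'm', 'dim']
--
-- MINOR_KEY_CHORDS = ['m', 'dim', '', 'm', 'm', '', '']
--
-- def get_harmonic_field(root_note: str) -> list[str]: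
--     is_minor = 'm' in root_note
--     root_note_name = root_note.replace('m', '')
--
--     try:
--         current = NOTES.index(root_note_name.upper())
--     except ValueError:
--         return None
--
--     steps = MINOR_SCALE_STEPS if is_minor else MAJOR_SCALE_STEPS
--     qualities = MINOR_KEY_CHORDS if is_minor else MAJOR_KEY_CHORDS
--
--     harmonic_field = []
--     for step, quality in zip(steps, qualities):
--         harmonic_field.append(NOTES[current % 12] + quality)
--         current += step
--
--     return harmonic_field
-- ===== Notes on version B (the rewrite author's own statement) =====
-- stated objective: alternative
-- what changed: Replaces absolute-interval lookups (root_index + INTERVALS[i]) % 12 indexed by range(7) with a stateful walk: a step pattern per scale and a running index advanced while zipping steps with chord qualities.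
import Mathlib
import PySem

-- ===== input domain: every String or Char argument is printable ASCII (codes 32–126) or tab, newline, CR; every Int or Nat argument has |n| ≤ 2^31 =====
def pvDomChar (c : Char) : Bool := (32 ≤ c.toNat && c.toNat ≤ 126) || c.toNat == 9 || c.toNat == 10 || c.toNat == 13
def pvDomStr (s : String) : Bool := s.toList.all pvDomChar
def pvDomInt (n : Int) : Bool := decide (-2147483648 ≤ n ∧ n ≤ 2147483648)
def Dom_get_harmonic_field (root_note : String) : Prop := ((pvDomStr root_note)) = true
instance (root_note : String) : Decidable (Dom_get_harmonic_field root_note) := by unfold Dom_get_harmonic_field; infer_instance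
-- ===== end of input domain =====

-- B builds the same 7 chords by a stateful walk (per-scale step pattern, running index zipped with qualities) instead of absolute-interval lookups; objective: alternative.


-- ===== PORT A =====
def pvNOTES : List String := ["C", "C#", "D", "D#", "E", "F", "F#", "G", "G#", "A", "A#", "B"]
def pvMAJOR_SCALE_INTERVALS : List Int := [0, 2, 4, 5, 7, 9, 11]
def pvNATURAL_MINOR_SCALE_INTERVALS : List Int := [0, 2, 3, 5, 7, 8, 10]
def pvMAJOR_KEY_CHORDS : List String := ["", "m", "m", "", "", "m", "dim"]
def pvMINOR_KEY_CHORDS : List String := ["m", "dim", "", "m", "m", "", ""]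

def get_harmonic_field (root_note : String) : Option (List String) :=
  let is_minor := PySem.Str.isIn "m" root_note
  let root_note_name := PySem.Str.replace root_note "m" ""
  match PySem.List.index? pvNOTES (PySem.Str.upper root_note_name) with
  | none => none
  | some root_index =>
    let scale_intervals := if is_minor then pvNATURAL_MINOR_SCALE_INTERVALS else pvMAJOR_SCALE_INTERVALS
    let chord_qualities := if is_minor then pvMINOR_KEY_CHORDS else pvMAJOR_KEY_CHORDS
    let harmonic_field := (PySem.List.pyRange 0 7 1).foldl (fun acc i =>
      let note_index := PySem.Int.mod ((root_index : Int) + PySem.List.pyGetD scale_intervals i 0) 12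
      let note_name := PySem.List.pyGetD pvNOTES note_index ""
      let chord_name := note_name ++ PySem.List.pyGetD chord_qualities i ""
      acc ++ [chord_name]) []
    some harmonic_field

-- ===== PORT B =====
def pvMAJOR_SCALE_STEPS : List Int := [2, 2, 1, 2, 2, 2, 1]
def pvMINOR_SCALE_STEPS : List Int := [2, 1, 2, 2, 1, 2, 2]

def get_harmonic_field_alt (root_note : String) : Option (List String) :=
  let is_minor := PySem.Str.isIn "m" root_note
  let root_note_name := PySem.Str.replace root_note "m" ""
  match PySem.List.index? pvNOTES (PySem.Str.upper root_note_name) with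
  | none => none
  | some current0 =>
    let steps := if is_minor then pvMINOR_SCALE_STEPS else pvMAJOR_SCALE_STEPS
    let qualities := if is_minor then pvMINOR_KEY_CHORDS else pvMAJOR_KEY_CHORDS
    let r := (steps.zip qualities).foldl
      (fun (st : Int × List String) sq =>
        (st.1 + sq.1, st.2 ++ [PySem.List.pyGetD pvNOTES (PySem.Int.mod st.1 12) "" ++ sq.2]))
      ((current0 : Int), [])
    some r.2

-- ===== PRECONDITION & SPEC =====
def Spec_get_harmonic_field (root_note : String) (out : Option (List String)) : Prop := out = get_harmonic_field_alt root_note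
instance (root_note : String) (out : Option (List String)) : Decidable (Spec_get_harmonic_field root_note out) := by unfold Spec_get_harmonic_field; infer_instance

-- ===== CLAIM (what is proved, stated in full; the proofs are below) =====
def Claim_equal_get_harmonic_field : Prop := ∀ (root_note : String), Dom_get_harmonic_field root_note → Spec_get_harmonic_field root_note (get_harmonic_field root_note)

-- ===== LEMMAS AND PROOFS =====

-- once parsing fixed the root index (< 12) and the minor flag, the two loop bodies agree: a finite check
set_option maxHeartbeats 2000000 in
theorem pv_body_eq : ∀ (k : Nat), k < 12 → ∀ (b : Bool),
    ((PySem.List.pyRange 0 7 1).foldl (fun acc i =>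
      acc ++ [PySem.List.pyGetD pvNOTES
          (PySem.Int.mod ((k : Int) + PySem.List.pyGetD (if b then pvNATURAL_MINOR_SCALE_INTERVALS else pvMAJOR_SCALE_INTERVALS) i 0) 12) ""
        ++ PySem.List.pyGetD (if b then pvMINOR_KEY_CHORDS else pvMAJOR_KEY_CHORDS) i ""]) []) =
    (((if b then pvMINOR_SCALE_STEPS else pvMAJOR_SCALE_STEPS).zip
        (if b then pvMINOR_KEY_CHORDS else pvMAJOR_KEY_CHORDS)).foldl
      (fun (st : Int × List String) sq =>
        (st.1 + sq.1, st.2 ++ [PySem.List.pyGetD pvNOTES (PySem.Int.mod st.1 12) "" ++ sq.2]))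
      ((k : Int), [])).2 := by decide

theorem pv_index_lt {v : String} {k : Nat} (h : PySem.List.index? pvNOTES v = some k) : k < 12 := by
  obtain ⟨hk, -, -⟩ := PySem.List.getElem_of_index?_eq_some h
  simpa [pvNOTES] using hk

-- ===== VERDICT (by name: the statement is the Claim_ definition above) =====
theorem get_harmonic_field_spec : Claim_equal_get_harmonic_field := by
  intro s _
  unfold Spec_get_harmonic_field
  show get_harmonic_field s = get_harmonic_field_alt s
  rw [get_harmonic_field, get_harmonic_field_alt]
  cases h : PySem.List.index? pvNOTES (PySem.Str.upper (PySem.Str.replace s "m" "")) with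
  | none => rfl
  | some k =>
    have hk : k < 12 := pv_index_lt h
    exact congrArg some (pv_body_eq k hk (PySem.Str.isIn "m" s))
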